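-- pv_equiv track=rewrite | github.com/jenkintownelectricity/Construction_OS | runtime/mirror_control/compatibility_reporter.py | _types_compatible
-- ===== SOURCE A (Python) =====
-- from typing import Any, Optional
--
-- def _types_compatible(expected: Any, actual: Any) -> bool:
--     """Check if two type descriptors are compatible."""
--     if expected == actual:
--         return True
--     # Allow string type names to match
--     exp_str = str(expected).lower().strip()
--     act_str = str(actual).lower().strip()
--     # Common compatible pairs
--     compatible_pairs = {
--         ("int", "integer"),
--         ("str", "string"),
--         ("bool", "boolean"),
--         ("float", "number"),
--         ("dict", "object"),
--         ("list", "array"),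
--     }
--     for a, b in compatible_pairs:
--         if (exp_str == a and act_str == b) or (exp_str == b and act_str == a):
--             return True
--     return exp_str == act_str
-- ===== SOURCE B (Python) =====
-- def _types_compatible(expected, actual) -> bool:
--     """Check if two type descriptors are compatible."""
--     if expected == actual:
--         return True
--     canon = {
--         "int": "int", "integer": "int",
--         "str": "str", "string": "str",
--         "bool": "bool", "boolean": "bool",
--         "float": "float", "number": "float",
--         "dict": "dict", "object": "dict",
--         "list": "list", "array": "list",
--     }
--     exp_str = str(expected).lower().strip()
--     act_str = str(actual).lower().strip()
--     return canon.get(exp_str, exp_str) == canon.get(act_str, act_str)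
-- ===== Notes on version B (the rewrite author's own statement) =====
-- stated objective: simpler
-- what changed: The set of six unordered alias pairs, the scan over them with the both-orderings test, and the final equality fallback are all replaced by one canonicalization dict mapping each alias to a representative, so the answer is a single comparison of canonical forms with no loop.
import Mathlib
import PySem

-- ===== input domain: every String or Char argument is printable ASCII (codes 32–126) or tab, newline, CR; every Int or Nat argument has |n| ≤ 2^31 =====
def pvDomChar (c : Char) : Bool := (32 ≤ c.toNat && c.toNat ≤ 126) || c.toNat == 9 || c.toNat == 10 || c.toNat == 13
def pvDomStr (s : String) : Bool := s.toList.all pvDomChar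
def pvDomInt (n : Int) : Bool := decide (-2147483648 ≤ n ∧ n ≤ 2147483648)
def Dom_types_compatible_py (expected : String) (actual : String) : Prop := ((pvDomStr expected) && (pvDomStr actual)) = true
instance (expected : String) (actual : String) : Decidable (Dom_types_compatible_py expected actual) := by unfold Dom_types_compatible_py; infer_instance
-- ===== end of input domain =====

-- B replaces A's six-pair set, its scanning loop with the both-orderings test, and the
-- trailing equality fallback by one canonicalization dict and a single comparison (simpler).

-- ===== PORT A =====
-- the literal 'compatible_pairs' set (the loop's value is independent of set iteration order)
def pvPairsA : List (String × String) :=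
  [("int", "integer"), ("str", "string"), ("bool", "boolean"),
   ("float", "number"), ("dict", "object"), ("list", "array")]

-- the 'for a, b in compatible_pairs' loop with its early return, then 'return exp_str == act_str'
def pvLoopA : List (String × String) → String → String → Bool
  | [], e, a => e == a
  | (p, q) :: rest, e, a =>
      if (e == p && a == q) || (e == q && a == p) then true else pvLoopA rest e a

def types_compatible_py (expected : String) (actual : String) : Bool :=
  if expected == actual then true
  else
    let exp_str := PySem.Str.strip (PySem.Str.lower expected)
    let act_str := PySem.Str.strip (PySem.Str.lower actual)
    pvLoopA pvPairsA exp_str act_str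

-- ===== PORT B =====
-- Source B's 'canon' dict: every alias maps to a canonical representative
def pvCanonB : PySem.Dict String String :=
  PySem.Dict.ofList
    [("int", "int"), ("integer", "int"), ("str", "str"), ("string", "str"),
     ("bool", "bool"), ("boolean", "bool"), ("float", "float"), ("number", "float"),
     ("dict", "dict"), ("object", "dict"), ("list", "list"), ("array", "list")]

def types_compatible_py_alt (expected : String) (actual : String) : Bool :=
  if expected == actual then true
  else
    let exp_str := PySem.Str.strip (PySem.Str.lower expected)
    let act_str := PySem.Str.strip (PySem.Str.lower actual)
    pvCanonB.getD exp_str exp_str == pvCanonB.getD act_str act_str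

-- ===== PRECONDITION & SPEC =====
def Spec_types_compatible_py (expected : String) (actual : String) (out : Bool) : Prop := out = types_compatible_py_alt expected actual
instance (expected : String) (actual : String) (out : Bool) : Decidable (Spec_types_compatible_py expected actual out) := by unfold Spec_types_compatible_py; infer_instance

-- ===== CLAIM (what is proved, stated in full; the proofs are below) =====
def Claim_equal_types_compatible_py : Prop := ∀ (expected : String) (actual : String), Dom_types_compatible_py expected actual → Spec_types_compatible_py expected actual (types_compatible_py expected actual)

-- ===== LEMMAS AND PROOFS =====
-- proof-only: B's canonicalization as an explicit if-chain
def pvCanonIf (s : String) : String :=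
  if s = "int" then "int" else if s = "integer" then "int"
  else if s = "str" then "str" else if s = "string" then "str"
  else if s = "bool" then "bool" else if s = "boolean" then "bool"
  else if s = "float" then "float" else if s = "number" then "float"
  else if s = "dict" then "dict" else if s = "object" then "dict"
  else if s = "list" then "list" else if s = "array" then "list"
  else s

theorem pvCanonB_mk : pvCanonB = PySem.Dict.mk
    [("int", "int"), ("integer", "int"), ("str", "str"), ("string", "str"),
     ("bool", "bool"), ("boolean", "bool"), ("float", "float"), ("number", "float"),
     ("dict", "dict"), ("object", "dict"), ("list", "list"), ("array", "list")] := by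
  rfl

theorem pvCanonIf_nonkey (s : String) (h : s ≠ "int" ∧ s ≠ "integer" ∧ s ≠ "str" ∧ s ≠ "string" ∧ s ≠ "bool" ∧ s ≠ "boolean" ∧ s ≠ "float" ∧ s ≠ "number" ∧ s ≠ "dict" ∧ s ≠ "object" ∧ s ≠ "list" ∧ s ≠ "array") : pvCanonIf s = s := by
  obtain ⟨h1, h2, h3, h4, h5, h6, h7, h8, h9, h10, h11, h12⟩ := h
  unfold pvCanonIf
  simp [h1, h2, h3, h4, h5, h6, h7, h8, h9, h10, h11, h12]

theorem pvCanonB_getD (s : String) : pvCanonB.getD s s = pvCanonIf s := by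
  by_cases g1 : s = "int"
  · subst g1; decide
  by_cases g2 : s = "integer"
  · subst g2; decide
  by_cases g3 : s = "str"
  · subst g3; decide
  by_cases g4 : s = "string"
  · subst g4; decide
  by_cases g5 : s = "bool"
  · subst g5; decide
  by_cases g6 : s = "boolean"
  · subst g6; decide
  by_cases g7 : s = "float"
  · subst g7; decide
  by_cases g8 : s = "number"
  · subst g8; decide
  by_cases g9 : s = "dict"
  · subst g9; decide
  by_cases g10 : s = "object"
  · subst g10; decide
  by_cases g11 : s = "list"
  · subst g11; decide
  by_cases g12 : s = "array"
  · subst g12; decide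
  · rw [pvCanonIf_nonkey s ⟨g1, g2, g3, g4, g5, g6, g7, g8, g9, g10, g11, g12⟩, pvCanonB_mk]
    simp only [PySem.Dict.getD_eq_get?_getD, PySem.Dict.get?_mk_cons, beq_iff_eq]
    rw [if_neg (Ne.symm g1), if_neg (Ne.symm g2), if_neg (Ne.symm g3), if_neg (Ne.symm g4), if_neg (Ne.symm g5), if_neg (Ne.symm g6), if_neg (Ne.symm g7), if_neg (Ne.symm g8), if_neg (Ne.symm g9), if_neg (Ne.symm g10), if_neg (Ne.symm g11), if_neg (Ne.symm g12)]
    rfl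

theorem pvFiber_int (a : String) : ("int" == pvCanonIf a) = (a == "int" || a == "integer") := by
  by_cases g1 : a = "int"
  · subst g1; decide
  by_cases g2 : a = "integer"
  · subst g2; decide
  by_cases g3 : a = "str"
  · subst g3; decide
  by_cases g4 : a = "string"
  · subst g4; decide
  by_cases g5 : a = "bool"
  · subst g5; decide
  by_cases g6 : a = "boolean"
  · subst g6; decide
  by_cases g7 : a = "float"
  · subst g7; decide
  by_cases g8 : a = "number"
  · subst g8; decide
  by_cases g9 : a = "dict"
  · subst g9; decide
  by_cases g10 : a = "object"
  · subst g10; decide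
  by_cases g11 : a = "list"
  · subst g11; decide
  by_cases g12 : a = "array"
  · subst g12; decide
  · rw [pvCanonIf_nonkey a ⟨g1, g2, g3, g4, g5, g6, g7, g8, g9, g10, g11, g12⟩, Bool.eq_iff_iff]
    simp [g1, g2, Ne.symm g1]

theorem pvFiber_str (a : String) : ("str" == pvCanonIf a) = (a == "str" || a == "string") := by
  by_cases g1 : a = "int"
  · subst g1; decide
  by_cases g2 : a = "integer"
  · subst g2; decide
  by_cases g3 : a = "str"
  · subst g3; decide
  by_cases g4 : a = "string"
  · subst g4; decide
  by_cases g5 : a = "bool"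
  · subst g5; decide
  by_cases g6 : a = "boolean"
  · subst g6; decide
  by_cases g7 : a = "float"
  · subst g7; decide
  by_cases g8 : a = "number"
  · subst g8; decide
  by_cases g9 : a = "dict"
  · subst g9; decide
  by_cases g10 : a = "object"
  · subst g10; decide
  by_cases g11 : a = "list"
  · subst g11; decide
  by_cases g12 : a = "array"
  · subst g12; decide
  · rw [pvCanonIf_nonkey a ⟨g1, g2, g3, g4, g5, g6, g7, g8, g9, g10, g11, g12⟩, Bool.eq_iff_iff]
    simp [g3, g4, Ne.symm g3]

theorem pvFiber_bool (a : String) : ("bool" == pvCanonIf a) = (a == "bool" || a == "boolean") := by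
  by_cases g1 : a = "int"
  · subst g1; decide
  by_cases g2 : a = "integer"
  · subst g2; decide
  by_cases g3 : a = "str"
  · subst g3; decide
  by_cases g4 : a = "string"
  · subst g4; decide
  by_cases g5 : a = "bool"
  · subst g5; decide
  by_cases g6 : a = "boolean"
  · subst g6; decide
  by_cases g7 : a = "float"
  · subst g7; decide
  by_cases g8 : a = "number"
  · subst g8; decide
  by_cases g9 : a = "dict"
  · subst g9; decide
  by_cases g10 : a = "object"
  · subst g10; decide
  by_cases g11 : a = "list"
  · subst g11; decide
  by_cases g12 : a = "array"
  · subst g12; decide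
  · rw [pvCanonIf_nonkey a ⟨g1, g2, g3, g4, g5, g6, g7, g8, g9, g10, g11, g12⟩, Bool.eq_iff_iff]
    simp [g5, g6, Ne.symm g5]

theorem pvFiber_float (a : String) : ("float" == pvCanonIf a) = (a == "float" || a == "number") := by
  by_cases g1 : a = "int"
  · subst g1; decide
  by_cases g2 : a = "integer"
  · subst g2; decide
  by_cases g3 : a = "str"
  · subst g3; decide
  by_cases g4 : a = "string"
  · subst g4; decide
  by_cases g5 : a = "bool"
  · subst g5; decide
  by_cases g6 : a = "boolean"
  · subst g6; decide
  by_cases g7 : a = "float"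
  · subst g7; decide
  by_cases g8 : a = "number"
  · subst g8; decide
  by_cases g9 : a = "dict"
  · subst g9; decide
  by_cases g10 : a = "object"
  · subst g10; decide
  by_cases g11 : a = "list"
  · subst g11; decide
  by_cases g12 : a = "array"
  · subst g12; decide
  · rw [pvCanonIf_nonkey a ⟨g1, g2, g3, g4, g5, g6, g7, g8, g9, g10, g11, g12⟩, Bool.eq_iff_iff]
    simp [g7, g8, Ne.symm g7]

theorem pvFiber_dict (a : String) : ("dict" == pvCanonIf a) = (a == "dict" || a == "object") := by
  by_cases g1 : a = "int"
  · subst g1; decide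
  by_cases g2 : a = "integer"
  · subst g2; decide
  by_cases g3 : a = "str"
  · subst g3; decide
  by_cases g4 : a = "string"
  · subst g4; decide
  by_cases g5 : a = "bool"
  · subst g5; decide
  by_cases g6 : a = "boolean"
  · subst g6; decide
  by_cases g7 : a = "float"
  · subst g7; decide
  by_cases g8 : a = "number"
  · subst g8; decide
  by_cases g9 : a = "dict"
  · subst g9; decide
  by_cases g10 : a = "object"
  · subst g10; decide
  by_cases g11 : a = "list"
  · subst g11; decide
  by_cases g12 : a = "array"
  · subst g12; decide
  · rw [pvCanonIf_nonkey a ⟨g1, g2, g3, g4, g5, g6, g7, g8, g9, g10, g11, g12⟩, Bool.eq_iff_iff]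
    simp [g9, g10, Ne.symm g9]

theorem pvFiber_list (a : String) : ("list" == pvCanonIf a) = (a == "list" || a == "array") := by
  by_cases g1 : a = "int"
  · subst g1; decide
  by_cases g2 : a = "integer"
  · subst g2; decide
  by_cases g3 : a = "str"
  · subst g3; decide
  by_cases g4 : a = "string"
  · subst g4; decide
  by_cases g5 : a = "bool"
  · subst g5; decide
  by_cases g6 : a = "boolean"
  · subst g6; decide
  by_cases g7 : a = "float"
  · subst g7; decide
  by_cases g8 : a = "number"
  · subst g8; decide
  by_cases g9 : a = "dict"
  · subst g9; decide
  by_cases g10 : a = "object"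
  · subst g10; decide
  by_cases g11 : a = "list"
  · subst g11; decide
  by_cases g12 : a = "array"
  · subst g12; decide
  · rw [pvCanonIf_nonkey a ⟨g1, g2, g3, g4, g5, g6, g7, g8, g9, g10, g11, g12⟩, Bool.eq_iff_iff]
    simp [g11, g12, Ne.symm g11]

theorem pvNonkey (e a : String) (h : e ≠ "int" ∧ e ≠ "integer" ∧ e ≠ "str" ∧ e ≠ "string" ∧ e ≠ "bool" ∧ e ≠ "boolean" ∧ e ≠ "float" ∧ e ≠ "number" ∧ e ≠ "dict" ∧ e ≠ "object" ∧ e ≠ "list" ∧ e ≠ "array") :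
    (e == pvCanonIf a) = (e == a) := by
  obtain ⟨h1, h2, h3, h4, h5, h6, h7, h8, h9, h10, h11, h12⟩ := h
  by_cases g1 : a = "int"
  · subst g1
    rw [show pvCanonIf "int" = "int" from rfl]
  by_cases g2 : a = "integer"
  · subst g2
    rw [show pvCanonIf "integer" = "int" from rfl]
    simp [h1, h2]
  by_cases g3 : a = "str"
  · subst g3
    rw [show pvCanonIf "str" = "str" from rfl]
  by_cases g4 : a = "string"
  · subst g4
    rw [show pvCanonIf "string" = "str" from rfl]
    simp [h3, h4]
  by_cases g5 : a = "bool"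
  · subst g5
    rw [show pvCanonIf "bool" = "bool" from rfl]
  by_cases g6 : a = "boolean"
  · subst g6
    rw [show pvCanonIf "boolean" = "bool" from rfl]
    simp [h5, h6]
  by_cases g7 : a = "float"
  · subst g7
    rw [show pvCanonIf "float" = "float" from rfl]
  by_cases g8 : a = "number"
  · subst g8
    rw [show pvCanonIf "number" = "float" from rfl]
    simp [h7, h8]
  by_cases g9 : a = "dict"
  · subst g9
    rw [show pvCanonIf "dict" = "dict" from rfl]
  by_cases g10 : a = "object"
  · subst g10
    rw [show pvCanonIf "object" = "dict" from rfl]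
    simp [h9, h10]
  by_cases g11 : a = "list"
  · subst g11
    rw [show pvCanonIf "list" = "list" from rfl]
  by_cases g12 : a = "array"
  · subst g12
    rw [show pvCanonIf "array" = "list" from rfl]
    simp [h11, h12]
  · rw [pvCanonIf_nonkey a ⟨g1, g2, g3, g4, g5, g6, g7, g8, g9, g10, g11, g12⟩]

theorem pvLoop_eq_canon (e a : String) :
    pvLoopA pvPairsA e a = (pvCanonB.getD e e == pvCanonB.getD a a) := by
  rw [pvCanonB_getD, pvCanonB_getD]
  by_cases h1 : e = "int"
  · subst h1
    rw [show pvCanonIf "int" = "int" from rfl, pvFiber_int]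
    simp [pvLoopA, pvPairsA]
    by_cases ha : a = "int"
    · simp [ha]
    · by_cases hb : a = "integer"
      · simp [hb]
      · rw [Bool.eq_iff_iff]; simp [ha, hb, Ne.symm ha]
  by_cases h2 : e = "integer"
  · subst h2
    rw [show pvCanonIf "integer" = "int" from rfl, pvFiber_int]
    simp [pvLoopA, pvPairsA]
    by_cases ha : a = "int"
    · simp [ha]
    · by_cases hb : a = "integer"
      · simp [hb]
      · rw [Bool.eq_iff_iff]; simp [ha, hb, Ne.symm hb]
  by_cases h3 : e = "str"
  · subst h3
    rw [show pvCanonIf "str" = "str" from rfl, pvFiber_str]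
    simp [pvLoopA, pvPairsA]
    by_cases ha : a = "str"
    · simp [ha]
    · by_cases hb : a = "string"
      · simp [hb]
      · rw [Bool.eq_iff_iff]; simp [ha, hb, Ne.symm ha]
  by_cases h4 : e = "string"
  · subst h4
    rw [show pvCanonIf "string" = "str" from rfl, pvFiber_str]
    simp [pvLoopA, pvPairsA]
    by_cases ha : a = "str"
    · simp [ha]
    · by_cases hb : a = "string"
      · simp [hb]
      · rw [Bool.eq_iff_iff]; simp [ha, hb, Ne.symm hb]
  by_cases h5 : e = "bool"
  · subst h5
    rw [show pvCanonIf "bool" = "bool" from rfl, pvFiber_bool]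
    simp [pvLoopA, pvPairsA]
    by_cases ha : a = "bool"
    · simp [ha]
    · by_cases hb : a = "boolean"
      · simp [hb]
      · rw [Bool.eq_iff_iff]; simp [ha, hb, Ne.symm ha]
  by_cases h6 : e = "boolean"
  · subst h6
    rw [show pvCanonIf "boolean" = "bool" from rfl, pvFiber_bool]
    simp [pvLoopA, pvPairsA]
    by_cases ha : a = "bool"
    · simp [ha]
    · by_cases hb : a = "boolean"
      · simp [hb]
      · rw [Bool.eq_iff_iff]; simp [ha, hb, Ne.symm hb]
  by_cases h7 : e = "float"
  · subst h7
    rw [show pvCanonIf "float" = "float" from rfl, pvFiber_float]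
    simp [pvLoopA, pvPairsA]
    by_cases ha : a = "float"
    · simp [ha]
    · by_cases hb : a = "number"
      · simp [hb]
      · rw [Bool.eq_iff_iff]; simp [ha, hb, Ne.symm ha]
  by_cases h8 : e = "number"
  · subst h8
    rw [show pvCanonIf "number" = "float" from rfl, pvFiber_float]
    simp [pvLoopA, pvPairsA]
    by_cases ha : a = "float"
    · simp [ha]
    · by_cases hb : a = "number"
      · simp [hb]
      · rw [Bool.eq_iff_iff]; simp [ha, hb, Ne.symm hb]
  by_cases h9 : e = "dict"
  · subst h9
    rw [show pvCanonIf "dict" = "dict" from rfl, pvFiber_dict]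
    simp [pvLoopA, pvPairsA]
    by_cases ha : a = "dict"
    · simp [ha]
    · by_cases hb : a = "object"
      · simp [hb]
      · rw [Bool.eq_iff_iff]; simp [ha, hb, Ne.symm ha]
  by_cases h10 : e = "object"
  · subst h10
    rw [show pvCanonIf "object" = "dict" from rfl, pvFiber_dict]
    simp [pvLoopA, pvPairsA]
    by_cases ha : a = "dict"
    · simp [ha]
    · by_cases hb : a = "object"
      · simp [hb]
      · rw [Bool.eq_iff_iff]; simp [ha, hb, Ne.symm hb]
  by_cases h11 : e = "list"
  · subst h11
    rw [show pvCanonIf "list" = "list" from rfl, pvFiber_list]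
    simp [pvLoopA, pvPairsA]
    by_cases ha : a = "list"
    · simp [ha]
    · by_cases hb : a = "array"
      · simp [hb]
      · rw [Bool.eq_iff_iff]; simp [ha, hb, Ne.symm ha]
  by_cases h12 : e = "array"
  · subst h12
    rw [show pvCanonIf "array" = "list" from rfl, pvFiber_list]
    simp [pvLoopA, pvPairsA]
    by_cases ha : a = "list"
    · simp [ha]
    · by_cases hb : a = "array"
      · simp [hb]
      · rw [Bool.eq_iff_iff]; simp [ha, hb, Ne.symm hb]
  · rw [pvCanonIf_nonkey e ⟨h1, h2, h3, h4, h5, h6, h7, h8, h9, h10, h11, h12⟩, pvNonkey e a ⟨h1, h2, h3, h4, h5, h6, h7, h8, h9, h10, h11, h12⟩]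
    simp [pvLoopA, pvPairsA, h1, h2, h3, h4, h5, h6, h7, h8, h9, h10, h11, h12]

-- ===== VERDICT (by name: the statement is the Claim_ definition above) =====
theorem types_compatible_py_spec : Claim_equal_types_compatible_py := by
  intro expected actual _
  unfold Spec_types_compatible_py types_compatible_py types_compatible_py_alt
  by_cases h : expected == actual
  · simp [h]
  · simp only [h, if_false, Bool.false_eq_true]
    exact pvLoop_eq_canon _ _
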